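-- pv_equiv track=rewrite | github.com/j2noo/SJCE_Algorithm_Study | yeop/10주차/13413_오셀로 재배치.py | solve
-- ===== SOURCE A (Python) =====
-- def solve(initial_state, goal_state):
--   W_initial = initial_state.count('W')
--   W_goal = goal_state.count('W')
--   letter_diff = abs(W_initial - W_goal) # W의 개수 차이
--
--   length = len(initial_state)
--   diff = 0 # 각 포지션 별 다른 개수
--   for i in range(length):
--     if initial_state[i] != goal_state[i]:
--       diff += 1
--
--   return letter_diff + (diff - letter_diff) // 2
-- ===== SOURCE B (Python) =====
-- def solve(initial_state, goal_state):
--     p = q = r = 0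
--     for i in range(len(initial_state)):
--         a = initial_state[i]
--         b = goal_state[i]
--         if a != b:
--             if a == 'W':
--                 p += 1
--             elif b == 'W':
--                 q += 1
--             else:
--                 r += 1
--     return max(p, q) + r // 2
-- ===== Notes on version B (the rewrite author's own statement) =====
-- stated objective: alternative
-- what changed: Drops A's two whole-string count('W') passes and the letter_diff + (diff - letter_diff)//2 arithmetic; instead one loop classifies each mismatching position into three counters p/q/r (initial side is 'W' / goal side is 'W' / neither) and returns max(p, q) + r // 2.
-- outside the precondition, e.g. on solve('W', 'BW'): A returns 0, B returns 1; on solve('B', 'WW'): A returns 1, B returns 1; on solve('WB', 'B'): A raises IndexError, B raises IndexError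
import Mathlib
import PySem

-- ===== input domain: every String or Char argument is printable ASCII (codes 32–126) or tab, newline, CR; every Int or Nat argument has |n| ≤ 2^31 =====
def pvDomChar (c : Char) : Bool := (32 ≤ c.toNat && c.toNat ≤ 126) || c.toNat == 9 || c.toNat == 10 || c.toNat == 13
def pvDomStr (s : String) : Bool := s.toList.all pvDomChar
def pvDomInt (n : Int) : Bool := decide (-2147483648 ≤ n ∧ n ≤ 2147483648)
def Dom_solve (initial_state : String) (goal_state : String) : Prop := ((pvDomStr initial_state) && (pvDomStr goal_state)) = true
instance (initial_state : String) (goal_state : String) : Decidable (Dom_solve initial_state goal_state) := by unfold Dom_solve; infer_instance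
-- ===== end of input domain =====

-- B drops A's two whole-string count('W') passes and the letter_diff arithmetic: one loop
-- classifies each mismatch into three counters (initial is 'W' / goal is 'W' / neither) and
-- returns max(p, q) + r // 2 (objective: alternative decomposition, same cost).

-- ===== PORT A =====
def solve (initial_state : String) (goal_state : String) : Int :=
  let W_initial : Int := (PySem.Str.count initial_state "W" : Int)
  let W_goal : Int := (PySem.Str.count goal_state "W" : Int)
  let letter_diff : Int := |W_initial - W_goal|
  let length : Int := PySem.Str.len initial_state
  let diff : Int := (PySem.List.pyRange 0 length 1).foldl
    (fun acc i =>
      if PySem.Str.pyGet? initial_state i ≠ PySem.Str.pyGet? goal_state i then acc + 1 else acc) 0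
  letter_diff + PySem.Int.floordiv (diff - letter_diff) 2

-- ===== PORT B =====
def solve_alt (initial_state : String) (goal_state : String) : Int :=
  let st := (PySem.List.pyRange 0 (PySem.Str.len initial_state) 1).foldl
    (fun (st : Int × Int × Int) i =>
      let a := PySem.Str.pyGet? initial_state i
      let b := PySem.Str.pyGet? goal_state i
      if a ≠ b then
        if a = some 'W' then (st.1 + 1, st.2.1, st.2.2)
        else if b = some 'W' then (st.1, st.2.1 + 1, st.2.2)
        else (st.1, st.2.1, st.2.2 + 1)
      else st) ((0 : Int), (0 : Int), (0 : Int))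
  max st.1 st.2.1 + PySem.Int.floordiv st.2.2 2

-- ===== PRECONDITION & SPEC =====
-- Unequal-length board pairs are malformed: with goal_state shorter both A and B raise
-- IndexError; with goal_state longer no answer is specified and A reads 'W' cells from goal's
-- tail while B ignores cells beyond the initial board — both defensible, so Pre_ keeps the
-- unequal pairs where the two readings coincide (no 'W' beyond initial_state's length) and
-- excludes the rest.
def Pre_solve (initial_state : String) (goal_state : String) : Prop :=
  PySem.Str.len initial_state ≤ PySem.Str.len goal_state ∧
    (goal_state.toList.drop initial_state.toList.length).count 'W' = 0
instance (initial_state : String) (goal_state : String) : Decidable (Pre_solve initial_state goal_state) := by unfold Pre_solve; infer_instance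

def pvWitness_solve : String × String := ("WBWB", "BBWW")

def Spec_solve (initial_state : String) (goal_state : String) (out : Int) : Prop := out = solve_alt initial_state goal_state
instance (initial_state : String) (goal_state : String) (out : Int) : Decidable (Spec_solve initial_state goal_state out) := by unfold Spec_solve; infer_instance

-- ===== CLAIM (what is proved, stated in full; the proofs are below) =====
def Claim_equal_solve : Prop := ∀ (initial_state : String) (goal_state : String), Dom_solve initial_state goal_state → Pre_solve initial_state goal_state → Spec_solve initial_state goal_state (solve initial_state goal_state)

-- ===== LEMMAS AND PROOFS =====

-- mismatch classes over the paired characters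
def prMis (pr : Char × Char) : Bool := pr.1 != pr.2
def prP (pr : Char × Char) : Bool := pr.1 != pr.2 && pr.1 == 'W'
def prQ (pr : Char × Char) : Bool := pr.1 != pr.2 && !(pr.1 == 'W') && pr.2 == 'W'
def prR (pr : Char × Char) : Bool := pr.1 != pr.2 && !(pr.1 == 'W') && !(pr.2 == 'W')

-- an index loop over range(len xs) visits exactly the pairs of the zip when xs is no longer than ys
theorem foldl_range_zip {α : Type} (g : α → Option Char → Option Char → α) :
    ∀ (xs ys : List Char), xs.length ≤ ys.length → ∀ (init : α),
      (List.range xs.length).foldl (fun acc k => g acc xs[k]? ys[k]?) init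
        = (xs.zip ys).foldl (fun acc p => g acc (some p.1) (some p.2)) init := by
  intro xs
  induction xs with
  | nil => intro ys h init; simp
  | cons x t ih =>
    intro ys h init
    cases ys with
    | nil => simp at h
    | cons y u =>
      simp only [List.length_cons, List.range_succ_eq_map, List.foldl_cons, List.foldl_map,
        List.getElem?_cons_zero, List.getElem?_cons_succ, List.zip_cons_cons]
      exact ih u (by simpa using h) (g init (some x) (some y))

-- B's loop computes the three class counts
theorem foldl_triple : ∀ (l : List (Char × Char)) (p q r : Int),
    l.foldl
      (fun (st : Int × Int × Int) pr =>
        if (some pr.1 : Option Char) ≠ (some pr.2 : Option Char) then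
          if (some pr.1 : Option Char) = some 'W' then (st.1 + 1, st.2.1, st.2.2)
          else if (some pr.2 : Option Char) = some 'W' then (st.1, st.2.1 + 1, st.2.2)
          else (st.1, st.2.1, st.2.2 + 1)
        else st) (p, q, r)
      = (p + (l.countP prP : Int), q + (l.countP prQ : Int), r + (l.countP prR : Int)) := by
  intro l
  induction l with
  | nil => intro p q r; simp
  | cons x t ih =>
    intro p q r
    rw [List.foldl_cons]
    by_cases h1 : x.1 = x.2
    · rw [if_neg (by simp [h1]), ih]
      simp [List.countP_cons, prP, prQ, prR, h1]
    · by_cases h2 : x.1 = 'W'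
      · have h4 : ('W' : Char) ≠ x.2 := by rw [← h2]; exact h1
        rw [if_pos (by simp [h1]), if_pos (by simp [h2]), ih]
        simp [List.countP_cons, prP, prQ, prR, h1, h2, h4, Prod.ext_iff]
        omega
      · by_cases h3 : x.2 = 'W'
        · rw [if_pos (by simp [h1]), if_neg (by simp [h2]), if_pos (by simp [h3]), ih]
          simp [List.countP_cons, prP, prQ, prR, h1, h2, h3, Prod.ext_iff]
          omega
        · rw [if_pos (by simp [h1]), if_neg (by simp [h2]), if_neg (by simp [h3]), ih]
          simp [List.countP_cons, prP, prQ, prR, h1, h2, h3, Prod.ext_iff]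
          omega

-- every mismatch is in exactly one class
theorem countP_partition : ∀ (l : List (Char × Char)),
    (l.countP prMis : Int) = (l.countP prP : Int) + (l.countP prQ : Int) + (l.countP prR : Int) := by
  intro l
  induction l with
  | nil => simp
  | cons x t ih =>
    simp only [List.countP_cons]
    push_cast
    by_cases h1 : x.1 = x.2 <;> by_cases h2 : x.1 = 'W' <;> by_cases h3 : x.2 = 'W' <;>
      simp [prMis, prP, prQ, prR, h1, h2, h3] <;> omega

-- str.count with a single-character needle is the list count
theorem count_go_single (c : Char) : ∀ (fuel : Nat) (cs : List Char) (acc : Nat),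
    cs.length ≤ fuel → PySem.Chars.count.go [c] fuel cs acc = acc + cs.count c := by
  intro fuel
  induction fuel with
  | zero =>
    intro cs acc h
    cases cs with
    | nil => simp [PySem.Chars.count.go]
    | cons x t => simp at h
  | succ n ih =>
    intro cs acc h
    cases cs with
    | nil => simp [PySem.Chars.count.go]
    | cons x t =>
      simp only [PySem.Chars.count.go]
      by_cases hx : x = c
      · simp [hx, List.isPrefixOf, ih t (acc + 1) (by simpa using h)]
        omega
      · simp [List.isPrefixOf, Ne.symm hx, hx, ih t acc (by simpa using h)]

theorem str_count_single (s : String) : PySem.Str.count s "W" = s.toList.count 'W' := by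
  rw [PySem.Str.count_eq]
  show PySem.Chars.count s.toList ['W'] = _
  unfold PySem.Chars.count
  rw [if_neg (by simp), count_go_single 'W' s.toList.length s.toList 0 le_rfl]
  simp

-- matched positions contribute equally, so the W-count difference is P − Q
theorem count_rel_eq : ∀ (xs ys : List Char), xs.length = ys.length →
    (xs.count 'W' : Int) - (ys.count 'W' : Int)
      = ((xs.zip ys).countP prP : Int) - ((xs.zip ys).countP prQ : Int) := by
  intro xs
  induction xs with
  | nil =>
    intro ys h
    cases ys with
    | nil => simp
    | cons y u => simp at h
  | cons x t ih =>
    intro ys h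
    cases ys with
    | nil => simp at h
    | cons y u =>
      have hrec := ih u (by simpa using h)
      simp only [List.zip_cons_cons, List.countP_cons, List.count_cons]
      push_cast
      push_cast at hrec
      by_cases h1 : x = y <;> by_cases h2 : x = 'W' <;> by_cases h3 : y = 'W' <;>
        simp [prP, prQ, h1, h2, h3] <;> (try omega) <;>
        (rw [if_neg (fun hh => h3 hh.symm)]; omega)

-- zipping ignores the part of ys beyond xs's length
theorem zip_take_right : ∀ (xs ys : List Char), xs.zip ys = xs.zip (ys.take xs.length) := by
  intro xs
  induction xs with
  | nil => intro ys; simp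
  | cons x t ih =>
    intro ys
    cases ys with
    | nil => simp
    | cons y u => simp [List.zip_cons_cons, ih u]

-- with no 'W' beyond xs's length the W-count difference is still P − Q
theorem count_rel (xs ys : List Char) (hle : xs.length ≤ ys.length)
    (htail : (ys.drop xs.length).count 'W' = 0) :
    (xs.count 'W' : Int) - (ys.count 'W' : Int)
      = ((xs.zip ys).countP prP : Int) - ((xs.zip ys).countP prQ : Int) := by
  have hcount : ys.count 'W' = (ys.take xs.length).count 'W' := by
    conv_lhs => rw [← List.take_append_drop xs.length ys]
    rw [List.count_append, htail, Nat.add_zero]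
  rw [zip_take_right xs ys, hcount]
  exact count_rel_eq xs (ys.take xs.length) (by simp [hle])

-- the arithmetic identity: |p−q| + (p+q+r − |p−q|)//2 = max p q + r//2
theorem final_arith (ci cg p q r : Int) (h : ci - cg = p - q) :
    |ci - cg| + PySem.Int.floordiv (p + q + r - |ci - cg|) 2 = max p q + PySem.Int.floordiv r 2 := by
  rw [h, PySem.Int.floordiv_eq_ediv_of_pos (by omega), PySem.Int.floordiv_eq_ediv_of_pos (by omega)]
  rcases le_total p q with h' | h'
  · rw [abs_of_nonpos (by omega), max_eq_right h']; omega
  · rw [abs_of_nonneg (by omega), max_eq_left h']; omega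

-- ===== VERDICT (by name: the statement is the Claim_ definition above) =====
theorem solve_spec : Claim_equal_solve := by
  intro s t _ hpre
  unfold Spec_solve solve solve_alt
  unfold Pre_solve at hpre
  obtain ⟨hple, hptail⟩ := hpre
  simp only [PySem.Str.len_eq] at hple ⊢
  have hlen : s.toList.length ≤ t.toList.length := by exact_mod_cast hple
  simp only [Int.toNat_natCast, PySem.List.pyRange_zero, List.foldl_map, PySem.Str.pyGet?_natCast]
  rw [foldl_range_zip (fun acc a b => if a ≠ b then acc + 1 else acc) s.toList t.toList hlen,
      foldl_range_zip (fun (st : Int × Int × Int) a b =>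
        if a ≠ b then
          if a = some 'W' then (st.1 + 1, st.2.1, st.2.2)
          else if b = some 'W' then (st.1, st.2.1 + 1, st.2.2)
          else (st.1, st.2.1, st.2.2 + 1)
        else st) s.toList t.toList hlen,
      foldl_triple]
  have hmis : (s.toList.zip t.toList).foldl
      (fun acc (p : Char × Char) => if (some p.1 : Option Char) ≠ some p.2 then acc + 1 else acc) (0 : Int)
      = ((s.toList.zip t.toList).countP prMis : Int) := by
    rw [PySem.List.foldl_ite_add_one (fun p : Char × Char => (some p.1 : Option Char) ≠ some p.2)
          (s.toList.zip t.toList) 0,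
        List.countP_congr (q := prMis) (fun pr _ => by simp [prMis]), zero_add]
  rw [hmis, str_count_single, str_count_single, countP_partition]
  have := count_rel s.toList t.toList hlen hptail
  simp only [zero_add]
  exact (by
    have harr := final_arith (s.toList.count 'W' : Int) (t.toList.count 'W' : Int)
      ((s.toList.zip t.toList).countP prP : Int) ((s.toList.zip t.toList).countP prQ : Int)
      ((s.toList.zip t.toList).countP prR : Int) this
    linarith [harr])
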